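-- pv_equiv track=rewrite | github.com/Nuzz23/01DXUOA-Introduzione-alle-applicazioni-web | EsameIAW-02-2024/controlli_automatici.py | conta_annunci
-- ===== SOURCE A (Python) =====
-- def conta_annunci(annunci):
--     pubblici = 0
--     privati = 0
--
--     for annuncio in annunci:
--         if annuncio['disponibile']:
--             pubblici += 1
--         else:
--             privati += 1
--     return [pubblici, privati]
-- ===== SOURCE B (Python) =====
-- def conta_annunci(annunci):
--     flags = [bool(annuncio['disponibile']) for annuncio in annunci]
--     return [flags.count(True), flags.count(False)]
-- ===== Notes on version B (the rewrite author's own statement) =====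
-- stated objective: idiomatic
-- what changed: Replaces the two-accumulator branching loop by staged passes: first extract the list of availability flags, then obtain each result with list.count (no accumulator, no branch).
import Mathlib
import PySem

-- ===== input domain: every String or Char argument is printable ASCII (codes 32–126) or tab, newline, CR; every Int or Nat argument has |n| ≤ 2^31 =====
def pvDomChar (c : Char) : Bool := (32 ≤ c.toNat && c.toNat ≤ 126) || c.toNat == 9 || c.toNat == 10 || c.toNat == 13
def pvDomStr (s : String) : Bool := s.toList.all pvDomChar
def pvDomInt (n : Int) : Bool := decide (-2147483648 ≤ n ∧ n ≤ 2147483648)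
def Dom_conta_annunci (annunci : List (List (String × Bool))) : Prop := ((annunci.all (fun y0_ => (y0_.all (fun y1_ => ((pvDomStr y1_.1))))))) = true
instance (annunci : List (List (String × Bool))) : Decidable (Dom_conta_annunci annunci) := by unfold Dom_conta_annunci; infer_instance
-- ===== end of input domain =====

-- ===== PORT A =====
-- B replaces the two-accumulator branching loop by staged passes (extract flags, then count) (objective: idiomatic).
-- Port of A: two-counter branching loop over annunci; each dict is an assoc list, lookup = first match.
def conta_annunci (annunci : List (List (String × Bool))) : List Int :=
  let r := annunci.foldl
    (fun (acc : Int × Int) annuncio =>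
      if (annuncio.lookup "disponibile").getD false then (acc.1 + 1, acc.2) else (acc.1, acc.2 + 1))
    (0, 0)
  [r.1, r.2]

-- ===== PORT B =====
-- Port of B: map out the flags, then count True and count False (PySem.List.count = list.count).
def conta_annunci_alt (annunci : List (List (String × Bool))) : List Int :=
  let flags := annunci.map (fun annuncio => (annuncio.lookup "disponibile").getD false)
  [(PySem.List.count flags true : Int), (PySem.List.count flags false : Int)]

-- ===== PRECONDITION & SPEC =====
-- Pre_ excludes exactly the inputs where Python raises KeyError: a dict without the key "disponibile".
def Pre_conta_annunci (annunci : List (List (String × Bool))) : Prop :=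
  ∀ annuncio ∈ annunci, (annuncio.lookup "disponibile").isSome = true
instance (annunci : List (List (String × Bool))) : Decidable (Pre_conta_annunci annunci) := by
  unfold Pre_conta_annunci; infer_instance
def pvWitness_conta_annunci : (List (List (String × Bool))) :=
  [[("disponibile", true)], [("disponibile", false)]]
def Spec_conta_annunci (annunci : List (List (String × Bool))) (out : List Int) : Prop := out = conta_annunci_alt annunci
instance (annunci : List (List (String × Bool))) (out : List Int) : Decidable (Spec_conta_annunci annunci out) := by unfold Spec_conta_annunci; infer_instance

-- ===== CLAIM (what is proved, stated in full; the proofs are below) =====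
def Claim_equal_conta_annunci : Prop := ∀ (annunci : List (List (String × Bool))), Dom_conta_annunci annunci → Pre_conta_annunci annunci → Spec_conta_annunci annunci (conta_annunci annunci)

-- ===== LEMMAS AND PROOFS =====
theorem conta_annunci_foldl (annunci : List (List (String × Bool))) (p q : Int) :
    annunci.foldl
      (fun (acc : Int × Int) annuncio =>
        if (annuncio.lookup "disponibile").getD false then (acc.1 + 1, acc.2) else (acc.1, acc.2 + 1))
      (p, q)
    = (p + (PySem.List.count (annunci.map (fun annuncio => (annuncio.lookup "disponibile").getD false)) true : Int),
       q + (PySem.List.count (annunci.map (fun annuncio => (annuncio.lookup "disponibile").getD false)) false : Int)) := by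
  induction annunci generalizing p q with
  | nil => simp [PySem.List.count]
  | cons a t ih =>
    simp only [List.foldl_cons, List.map_cons]
    by_cases h : (a.lookup "disponibile").getD false
    · simp only [h, if_true]
      rw [ih]
      simp [PySem.List.count]
      ring
    · simp only [h, if_false, Bool.false_eq_true]
      rw [ih]
      simp [PySem.List.count]
      ring

-- ===== VERDICT (by name: the statement is the Claim_ definition above) =====
theorem conta_annunci_spec : Claim_equal_conta_annunci := by
  intro annunci _ _
  unfold Spec_conta_annunci conta_annunci conta_annunci_alt
  rw [conta_annunci_foldl]
  simp
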